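-- pv_equiv track=rewrite | github.com/vishruth0620/AEROSPACE_Classes | A&M_Courses/Engineering_General/Intro_to_Python/Lab12a_Act1.py | findmaxima_minima
-- ===== SOURCE A (Python) =====
-- def findmaxima_minima(y_Val):#Define a function to find maxima and minima using the y-values
--
--     """
--     :param y_Val: list
--     """
--
--
--
--     maxima = 0
--     minima = 0
--     for i in range(1,len(y_Val) - 1):
--         if((y_Val[i] > y_Val[i-1]) and (y_Val[i] > y_Val[i+1])):#Find the local maxima
--             maxima = i
--
--         if((y_Val[i] < y_Val[i-1]) and (y_Val[i] < y_Val[i+1])):#Find the local minima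
--             minima = i
--
--     return maxima, minima
-- ===== SOURCE B (Python) =====
-- def findmaxima_minima(y_Val):
--     """Same result as A: two reverse scans with early exit instead of one
--     forward overwrite loop; the first hit scanning backward is the last one."""
--     n = len(y_Val)
--     maxima = 0
--     for i in range(n - 2, 0, -1):
--         if y_Val[i] > y_Val[i - 1] and y_Val[i] > y_Val[i + 1]:
--             maxima = i
--             break
--     minima = 0
--     for i in range(n - 2, 0, -1):
--         if y_Val[i] < y_Val[i - 1] and y_Val[i] < y_Val[i + 1]:
--             minima = i
--             break
--     return maxima, minima
-- ===== Notes on version B (the rewrite author's own statement) =====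
-- stated objective: alternative
-- what changed: Replaces the single forward loop that overwrites maxima/minima with two independent reverse scans (range(n-2,0,-1)) that break on the first strict local max / min found, which is the last one forward.
import Mathlib
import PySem

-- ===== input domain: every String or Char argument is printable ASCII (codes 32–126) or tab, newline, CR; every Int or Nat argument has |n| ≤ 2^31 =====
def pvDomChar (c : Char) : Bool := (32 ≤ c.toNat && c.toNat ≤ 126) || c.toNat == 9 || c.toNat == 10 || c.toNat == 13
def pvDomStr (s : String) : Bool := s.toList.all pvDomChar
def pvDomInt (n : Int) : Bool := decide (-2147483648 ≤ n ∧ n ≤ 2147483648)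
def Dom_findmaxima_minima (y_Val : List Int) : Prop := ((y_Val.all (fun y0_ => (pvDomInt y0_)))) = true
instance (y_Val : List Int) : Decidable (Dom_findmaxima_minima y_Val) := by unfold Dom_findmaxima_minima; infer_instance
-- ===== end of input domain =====

-- B replaces A's forward overwrite loop by two reverse scans with early exit (objective: alternative, same cost).

-- ===== PORT A =====
-- indices produced by range(1, len-1) are always in range, so pyGetD with default 0 is exact here
def findmaxima_minima (y_Val : List Int) : Int × Int :=
  (PySem.List.pyRange 1 ((y_Val.length : Int) - 1) 1).foldl
    (fun st i =>
      let st1 := if PySem.List.pyGetD y_Val i 0 > PySem.List.pyGetD y_Val (i-1) 0 ∧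
                    PySem.List.pyGetD y_Val i 0 > PySem.List.pyGetD y_Val (i+1) 0
                 then (i, st.2) else st
      if PySem.List.pyGetD y_Val i 0 < PySem.List.pyGetD y_Val (i-1) 0 ∧
         PySem.List.pyGetD y_Val i 0 < PySem.List.pyGetD y_Val (i+1) 0
      then (st1.1, i) else st1)
    ((0 : Int), (0 : Int))

-- ===== PORT B =====
-- reverse scan for the maxima loop: scanMax y i examines indices i, i-1, …, 1 and stops at the first hit (the 'break')
def scanMax (y : List Int) : Nat → Int
  | 0 => 0
  | i+1 =>
    if PySem.List.pyGetD y ((i:Int)+1) 0 > PySem.List.pyGetD y (i:Int) 0 ∧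
       PySem.List.pyGetD y ((i:Int)+1) 0 > PySem.List.pyGetD y ((i:Int)+2) 0
    then ((i:Int)+1) else scanMax y i

-- reverse scan for the minima loop
def scanMin (y : List Int) : Nat → Int
  | 0 => 0
  | i+1 =>
    if PySem.List.pyGetD y ((i:Int)+1) 0 < PySem.List.pyGetD y (i:Int) 0 ∧
       PySem.List.pyGetD y ((i:Int)+1) 0 < PySem.List.pyGetD y ((i:Int)+2) 0
    then ((i:Int)+1) else scanMin y i

def findmaxima_minima_alt (y_Val : List Int) : Int × Int :=
  (scanMax y_Val (y_Val.length - 2), scanMin y_Val (y_Val.length - 2))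

-- ===== PRECONDITION & SPEC =====
def Spec_findmaxima_minima (y_Val : List Int) (out : Int × Int) : Prop := out = findmaxima_minima_alt y_Val
instance (y_Val : List Int) (out : Int × Int) : Decidable (Spec_findmaxima_minima y_Val out) := by unfold Spec_findmaxima_minima; infer_instance

-- ===== CLAIM (what is proved, stated in full; the proofs are below) =====
def Claim_equal_findmaxima_minima : Prop := ∀ (y_Val : List Int), Dom_findmaxima_minima y_Val → Spec_findmaxima_minima y_Val (findmaxima_minima y_Val)

-- ===== LEMMAS AND PROOFS =====

-- A's fold over range(1, 1+k) ends in the same state as B's reverse scans started at k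
lemma fold_eq_scan (y : List Int) (k : Nat) :
    (PySem.List.pyRange 1 (1 + (k:Int)) 1).foldl
      (fun st i =>
        let st1 := if PySem.List.pyGetD y i 0 > PySem.List.pyGetD y (i-1) 0 ∧
                      PySem.List.pyGetD y i 0 > PySem.List.pyGetD y (i+1) 0
                   then (i, st.2) else st
        if PySem.List.pyGetD y i 0 < PySem.List.pyGetD y (i-1) 0 ∧
           PySem.List.pyGetD y i 0 < PySem.List.pyGetD y (i+1) 0
        then (st1.1, i) else st1)
      ((0 : Int), (0 : Int)) = (scanMax y k, scanMin y k) := by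
  induction k with
  | zero => simp [PySem.List.pyRange_one_eq_nil, scanMax, scanMin]
  | succ k ih =>
    have h1 : (1 : Int) ≤ 1 + (k:Int) := by omega
    have hsplit : PySem.List.pyRange 1 (1 + ((k+1 : Nat):Int)) 1
        = PySem.List.pyRange 1 (1 + (k:Int)) 1 ++ [1 + (k:Int)] := by
      have := PySem.List.pyRange_one_succ_right (a := 1) (b := 1 + (k:Int)) h1
      simpa [add_comm, add_left_comm, add_assoc] using this
    rw [hsplit, List.foldl_append, ih]
    simp only [List.foldl_cons, List.foldl_nil]
    have e0 : (1:Int) + (k:Int) = (k:Int) + 1 := by ring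
    have e1 : (k:Int) + 1 - 1 = (k:Int) := by ring
    have e2 : (k:Int) + 1 + 1 = (k:Int) + 2 := by ring
    simp only [e0, e1, e2, scanMax, scanMin]
    by_cases hmax : (PySem.List.pyGetD y ((k:Int)+1) 0 > PySem.List.pyGetD y (k:Int) 0 ∧
        PySem.List.pyGetD y ((k:Int)+1) 0 > PySem.List.pyGetD y ((k:Int)+2) 0)
    · by_cases hmin : (PySem.List.pyGetD y ((k:Int)+1) 0 < PySem.List.pyGetD y (k:Int) 0 ∧
          PySem.List.pyGetD y ((k:Int)+1) 0 < PySem.List.pyGetD y ((k:Int)+2) 0)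
      · simp only [if_pos hmax, if_pos hmin]
      · simp only [if_pos hmax, if_neg hmin]
    · by_cases hmin : (PySem.List.pyGetD y ((k:Int)+1) 0 < PySem.List.pyGetD y (k:Int) 0 ∧
          PySem.List.pyGetD y ((k:Int)+1) 0 < PySem.List.pyGetD y ((k:Int)+2) 0)
      · simp only [if_neg hmax, if_pos hmin]
      · simp only [if_neg hmax, if_neg hmin]

theorem findmaxima_minima_eq (y : List Int) : findmaxima_minima y = findmaxima_minima_alt y := by
  unfold findmaxima_minima findmaxima_minima_alt
  by_cases h : 2 ≤ y.length
  · have hk : (y.length : Int) - 1 = 1 + ((y.length - 2 : Nat) : Int) := by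
      have : ((y.length - 2 : Nat) : Int) = (y.length : Int) - 2 := by omega
      omega
    rw [hk, fold_eq_scan]
  · have hk : y.length - 2 = 0 := by omega
    have hb : (y.length : Int) - 1 ≤ 1 := by omega
    rw [hk, PySem.List.pyRange_one_eq_nil hb]
    simp [scanMax, scanMin]

-- ===== VERDICT (by name: the statement is the Claim_ definition above) =====
theorem findmaxima_minima_spec : Claim_equal_findmaxima_minima := by
  intro y _
  unfold Spec_findmaxima_minima
  exact findmaxima_minima_eq y
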